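-- pv_equiv track=rewrite | github.com/uriberger/reserach_methods_in_software_engineering | extract_substring.py | short_extract_substring
-- ===== SOURCE A (Python) =====
-- import math
--
-- def short_extract_substring(my_str, indices):
--     best_start_index = -1
--     smallest_gap = math.inf
--     for start_index in indices:
--         cur_smallest_gap = math.inf
--         for end_index in indices:
--             if (
--                 end_index - start_index > 0
--                 and end_index - start_index < cur_smallest_gap
--             ):  # A single line computation
--                 cur_smallest_gap = end_index - start_index  # A single line copmutation
--         if cur_smallest_gap < smallest_gap:
--             best_start_index = start_index
--             smallest_gap = cur_smallest_gap
--
--     return my_str[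
--         best_start_index: best_start_index + smallest_gap
--     ]  # Use string slicing
-- ===== SOURCE B (Python) =====
-- def short_extract_substring(my_str, indices):
--     vals = sorted(set(indices))
--     gaps = {a: b - a for a, b in zip(vals, vals[1:])}
--     smallest_gap = min(gaps.values())
--     best_start_index = next(i for i in indices if gaps.get(i) == smallest_gap)
--     return my_str[best_start_index: best_start_index + smallest_gap]
-- ===== Notes on version B (the rewrite author's own statement) =====
-- stated objective: faster
-- what changed: B replaces A's quadratic scan of all index pairs by sorting the distinct indices once, reading each start's smallest positive gap off its successor in the sorted order (a dict built in one pass), and scanning the original list once for the first start attaining the minimal gap.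
-- outside the precondition, e.g. on short_extract_substring('abc', [5, 5]): A raises TypeError, B raises ValueError; on short_extract_substring('abc', []): A raises TypeError, B raises ValueError
import Mathlib
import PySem

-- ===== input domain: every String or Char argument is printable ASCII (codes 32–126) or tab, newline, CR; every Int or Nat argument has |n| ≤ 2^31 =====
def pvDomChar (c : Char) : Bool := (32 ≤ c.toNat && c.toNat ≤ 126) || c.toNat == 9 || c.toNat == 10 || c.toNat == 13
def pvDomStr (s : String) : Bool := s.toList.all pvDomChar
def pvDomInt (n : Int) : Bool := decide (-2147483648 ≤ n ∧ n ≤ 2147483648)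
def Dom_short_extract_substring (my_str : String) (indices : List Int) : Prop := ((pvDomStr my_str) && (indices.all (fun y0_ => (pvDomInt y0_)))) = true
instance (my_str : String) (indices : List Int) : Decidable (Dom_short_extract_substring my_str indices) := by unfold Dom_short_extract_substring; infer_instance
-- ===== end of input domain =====

-- B replaces A's quadratic all-pairs gap scan by sorting the distinct indices once and reading each
-- start's smallest positive gap off its successor in the sorted order (objective: faster, asymptotic).


-- ===== PORT A =====
-- state: (best_start_index, smallest_gap); `none` plays math.inf
def short_extract_substring (my_str : String) (indices : List Int) : String :=
  let st := indices.foldl (fun (st : Int × Option Int) start_index =>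
    let cur := indices.foldl (fun (c : Option Int) end_index =>
      if 0 < end_index - start_index then
        match c with
        | none => some (end_index - start_index)
        | some g => if end_index - start_index < g then some (end_index - start_index) else c
      else c) none
    match cur with
    | none => st
    | some c =>
      match st.2 with
      | none => (start_index, some c)
      | some g => if c < g then (start_index, some c) else st) ((-1 : Int), (none : Option Int))
  match st.2 with
  | some g => PySem.Str.slice my_str (some st.1) (some (st.1 + g))
  | none => ""  -- Python raises TypeError here (slice bound math.inf); excluded by Pre_

-- ===== PORT B =====
def short_extract_substring_alt (my_str : String) (indices : List Int) : String :=
  let vals := PySem.List.sorted (PySem.Set.ofList indices) (fun x => x) false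
  let gaps := (vals.zip vals.tail).foldl
    (fun (d : PySem.Dict Int Int) p => d.insert p.1 (p.2 - p.1)) PySem.Dict.empty
  match PySem.List.min? gaps.values (fun x => x) with
  | none => ""  -- Python raises ValueError here (min of no gaps); excluded by Pre_
  | some m =>
    match indices.find? (fun i => gaps.get? i == some m) with
    | none => ""  -- unreachable: the minimal gap is attained by some index
    | some b => PySem.Str.slice my_str (some b) (some (b + m))

-- ===== PRECONDITION & SPEC =====
-- Pre_ excludes exactly the inputs with no positive gap between two of the indices (fewer than two
-- distinct values): there A raises TypeError (slicing with math.inf) and B raises ValueError (min of []).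
def Pre_short_extract_substring (my_str : String) (indices : List Int) : Prop :=
  ∃ a ∈ indices, ∃ b ∈ indices, a < b
instance (my_str : String) (indices : List Int) : Decidable (Pre_short_extract_substring my_str indices) := by
  unfold Pre_short_extract_substring; infer_instance

def pvWitness_short_extract_substring : String × List Int := ("abcdef", [1, 3])

def Spec_short_extract_substring (my_str : String) (indices : List Int) (out : String) : Prop := out = short_extract_substring_alt my_str indices
instance (my_str : String) (indices : List Int) (out : String) : Decidable (Spec_short_extract_substring my_str indices out) := by unfold Spec_short_extract_substring; infer_instance

-- ===== CLAIM (what is proved, stated in full; the proofs are below) =====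
def Claim_equal_short_extract_substring : Prop := ∀ (my_str : String) (indices : List Int), Dom_short_extract_substring my_str indices → Pre_short_extract_substring my_str indices → Spec_short_extract_substring my_str indices (short_extract_substring my_str indices)

-- ===== LEMMAS AND PROOFS =====

-- option-valued minimum (none = +inf)
def pvOmerge : Option Int → Option Int → Option Int
  | none, y => y
  | some a, none => some a
  | some a, some b => some (min a b)

-- smallest positive gap from s to an element of l (none if no element exceeds s)
def pvMG (s : Int) : List Int → Option Int
  | [] => none
  | e :: t => if s < e then pvOmerge (pvMG s t) (some (e - s)) else pvMG s t

-- A's inner loop computes pvMG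
theorem pvMG_foldl (s : Int) (l : List Int) (c : Option Int) :
    l.foldl (fun (c : Option Int) e =>
      if 0 < e - s then
        match c with
        | none => some (e - s)
        | some g => if e - s < g then some (e - s) else c
      else c) c = pvOmerge c (pvMG s l) := by
  induction l generalizing c with
  | nil => cases c <;> rfl
  | cons e t ih =>
    simp only [List.foldl_cons, pvMG]
    rw [ih]
    by_cases h : s < e
    · rw [if_pos h, if_pos (by omega : (0:Int) < e - s)]
      cases c with
      | none =>
        cases hM : pvMG s t <;> simp [pvOmerge, min_comm]
      | some g =>
        cases hM : pvMG s t <;> simp only [pvOmerge] <;> split_ifs <;>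
          simp <;> omega
    · rw [if_neg h, if_neg (by omega : ¬ (0:Int) < e - s)]

theorem pvMG_none_iff (s : Int) (l : List Int) : pvMG s l = none ↔ ∀ e ∈ l, ¬ s < e := by
  induction l with
  | nil => simp [pvMG]
  | cons e t ih =>
    by_cases h : s < e
    · simp only [pvMG, if_pos h]
      constructor
      · intro hc; exact absurd hc (by cases hM : pvMG s t <;> simp [pvOmerge])
      · intro hall; exact absurd h (hall e (by simp))
    · simp only [pvMG, if_neg h, List.mem_cons]
      rw [ih]
      constructor
      · rintro ha e' (rfl | he')
        · exact h
        · exact ha e' he'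
      · intro ha e' he'; exact ha e' (Or.inr he')

theorem pvMG_some (s : Int) (l : List Int) (m : Int) (h : pvMG s l = some m) :
    s + m ∈ l ∧ 0 < m ∧ ∀ e ∈ l, s < e → m ≤ e - s := by
  induction l generalizing m with
  | nil => simp [pvMG] at h
  | cons e t ih =>
    by_cases hse : s < e
    · simp only [pvMG, if_pos hse] at h
      cases hM : pvMG s t with
      | none =>
        rw [hM] at h
        simp only [pvOmerge, Option.some.injEq] at h
        subst h
        refine ⟨by have he : s + (e - s) = e := by ring
                   rw [he]; exact List.mem_cons_self, by omega, ?_⟩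
        intro e' he' hlt
        rcases List.mem_cons.mp he' with rfl | he'
        · omega
        · exact absurd hlt ((pvMG_none_iff s t).mp hM e' he')
      | some g =>
        rw [hM] at h
        simp only [pvOmerge, Option.some.injEq] at h
        obtain ⟨h1, h2, h3⟩ := ih g hM
        subst h
        refine ⟨?_, by omega, ?_⟩
        · by_cases hge : g ≤ e - s
          · rw [min_eq_left hge]; exact List.mem_cons_of_mem _ h1
          · rw [min_eq_right (by omega)]
            simp only [List.mem_cons]; left; omega
        · intro e' he' hlt
          rcases List.mem_cons.mp he' with rfl | he'
          · exact le_trans (min_le_right _ _) (by omega)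
          · exact le_trans (min_le_left _ _) (h3 e' he' hlt)
    · simp only [pvMG, if_neg hse] at h
      obtain ⟨h1, h2, h3⟩ := ih m h
      refine ⟨List.mem_cons_of_mem _ h1, h2, ?_⟩
      intro e' he' hlt
      rcases List.mem_cons.mp he' with rfl | he'
      · exact absurd hlt hse
      · exact h3 e' he' hlt

theorem pvMG_eq_of (s m : Int) (l : List Int) (h1 : s + m ∈ l) (h2 : 0 < m)
    (h3 : ∀ e ∈ l, s < e → m ≤ e - s) : pvMG s l = some m := by
  cases hM : pvMG s l with
  | none => exact absurd (by omega : s < s + m) ((pvMG_none_iff s l).mp hM (s + m) h1)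
  | some m' =>
    obtain ⟨g1, g2, g3⟩ := pvMG_some s l m' hM
    have hm1 := h3 _ g1 (by omega)
    have hm2 := g3 _ h1 (by omega)
    congr 1; omega

-- the best (start, gap) pair A's outer loop selects: earliest start attaining the minimal gap
def pvPick (mgf : Int → Option Int) : List Int → Int × Option Int
  | [] => (-1, none)
  | s :: t =>
    match mgf s, (pvPick mgf t).2 with
    | none, _ => pvPick mgf t
    | some c, none => (s, some c)
    | some c, some m => if c ≤ m then (s, some c) else pvPick mgf t

theorem pvPick_foldl (mgf : Int → Option Int) (l : List Int) (b : Int) (g : Option Int) :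
    l.foldl (fun (st : Int × Option Int) s =>
      match mgf s with
      | none => st
      | some c =>
        match st.2 with
        | none => (s, some c)
        | some g => if c < g then (s, some c) else st) (b, g) =
    (match (pvPick mgf l).2, g with
     | none, _ => (b, g)
     | some _, none => pvPick mgf l
     | some c, some g0 => if c < g0 then pvPick mgf l else (b, g)) := by
  induction l generalizing b g with
  | nil => simp [pvPick]
  | cons s t ih =>
    simp only [List.foldl_cons, pvPick]
    cases hc : mgf s with
    | none =>
      simp only []
      rw [ih]
    | some c =>
      cases hg : g with
      | none =>
        simp only []
        rw [ih]
        cases hp : (pvPick mgf t).2 with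
        | none => simp
        | some m =>
          by_cases hcm : c ≤ m
          · have h2 : ¬ m < c := by omega
            simp [hcm, h2]
          · have h2 : m < c := by omega
            simp [hcm, h2, hp]
      | some g0 =>
        by_cases h1 : c < g0
        · simp only [if_pos h1]
          rw [ih]
          cases hp : (pvPick mgf t).2 with
          | none => simp [h1]
          | some m =>
            by_cases hcm : c ≤ m
            · have h2 : ¬ m < c := by omega
              simp [hcm, h2, h1]
            · have h2 : m < c := by omega
              have h3 : m < g0 := by omega
              simp [hcm, h2, h3, hp]
        · simp only [if_neg h1]
          rw [ih]
          cases hp : (pvPick mgf t).2 with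
          | none => simp [h1]
          | some m =>
            by_cases hcm : c ≤ m
            · have h2 : ¬ m < g0 := by omega
              simp [hcm, h1, h2]
            · have h2 : m < c := by omega
              simp [hcm, hp]

theorem pvPick_none (mgf : Int → Option Int) (l : List Int)
    (h : (pvPick mgf l).2 = none) : ∀ s ∈ l, mgf s = none := by
  induction l with
  | nil => simp
  | cons s t ih =>
    simp only [pvPick] at h
    cases hc : mgf s with
    | none =>
      rw [hc] at h
      simp only [] at h
      intro x hx
      rcases List.mem_cons.mp hx with rfl | hx
      · exact hc
      · exact ih h x hx
    | some c =>
      exfalso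
      rw [hc] at h
      cases hp : (pvPick mgf t).2 with
      | none => rw [hp] at h; simp only [] at h; simp at h
      | some m => rw [hp] at h; simp only [] at h; split_ifs at h; simp [hp] at h

theorem pvPick_min (mgf : Int → Option Int) (l : List Int) (m : Int)
    (h : (pvPick mgf l).2 = some m) :
    (pvPick mgf l).1 ∈ l ∧ mgf (pvPick mgf l).1 = some m ∧
      ∀ s ∈ l, ∀ c, mgf s = some c → m ≤ c := by
  induction l generalizing m with
  | nil => simp [pvPick] at h
  | cons s t ih =>
    simp only [pvPick] at h ⊢
    cases hc : mgf s with
    | none =>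
      rw [hc] at h
      simp only [] at h ⊢
      obtain ⟨g1, g2, g3⟩ := ih m h
      refine ⟨List.mem_cons_of_mem _ g1, g2, ?_⟩
      intro x hx c hxc
      rcases List.mem_cons.mp hx with rfl | hx
      · rw [hc] at hxc; cases hxc
      · exact g3 x hx c hxc
    | some c =>
      rw [hc] at h
      cases hp : (pvPick mgf t).2 with
      | none =>
        rw [hp] at h
        simp only [] at h ⊢
        simp only [Option.some.injEq] at h
        subst h
        refine ⟨List.mem_cons_self, hc, ?_⟩
        intro x hx c' hxc
        rcases List.mem_cons.mp hx with rfl | hx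
        · rw [hc] at hxc; exact le_of_eq (Option.some.inj hxc)
        · rw [pvPick_none mgf t hp x hx] at hxc; cases hxc
      | some m0 =>
        rw [hp] at h
        simp only [] at h ⊢
        obtain ⟨g1, g2, g3⟩ := ih m0 hp
        by_cases hcm : c ≤ m0
        · rw [if_pos hcm] at h ⊢
          simp only [Option.some.injEq] at h
          subst h
          refine ⟨List.mem_cons_self, hc, ?_⟩
          intro x hx c' hxc
          rcases List.mem_cons.mp hx with rfl | hx
          · rw [hc] at hxc; exact le_of_eq (Option.some.inj hxc)
          · exact le_trans hcm (g3 x hx c' hxc)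
        · rw [if_neg hcm] at h ⊢
          rw [hp] at h
          have hm : m = m0 := (Option.some.inj h).symm
          subst hm
          refine ⟨List.mem_cons_of_mem _ g1, g2, ?_⟩
          intro x hx c' hxc
          rcases List.mem_cons.mp hx with rfl | hx
          · rw [hc] at hxc; have := Option.some.inj hxc; omega
          · exact g3 x hx c' hxc

theorem pvPick_find (mgf : Int → Option Int) (l : List Int) (m : Int)
    (h : (pvPick mgf l).2 = some m) :
    l.find? (fun s => mgf s == some m) = some (pvPick mgf l).1 := by
  induction l generalizing m with
  | nil => simp [pvPick] at h
  | cons s t ih =>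
    simp only [pvPick] at h ⊢
    cases hc : mgf s with
    | none =>
      rw [hc] at h
      simp only [] at h ⊢
      rw [List.find?_cons_of_neg (by simp [hc])]
      exact ih m h
    | some c =>
      rw [hc] at h
      cases hp : (pvPick mgf t).2 with
      | none =>
        rw [hp] at h
        simp only [] at h ⊢
        simp only [Option.some.injEq] at h
        subst h
        rw [List.find?_cons_of_pos (by simp [hc])]
      | some m0 =>
        rw [hp] at h
        simp only [] at h ⊢
        by_cases hcm : c ≤ m0
        · rw [if_pos hcm] at h ⊢
          simp only [Option.some.injEq] at h
          subst h
          rw [List.find?_cons_of_pos (by simp [hc])]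
        · rw [if_neg hcm] at h ⊢
          rw [hp] at h
          have hm : m = m0 := (Option.some.inj h).symm
          have hne : ¬ c = m := by omega
          rw [List.find?_cons_of_neg (by simp [hc, hne])]
          rw [ih m (by rw [hm]; exact hp)]

theorem pvFind_congr_mem (l : List Int) (p q : Int → Bool)
    (h : ∀ x ∈ l, p x = q x) : l.find? p = l.find? q := by
  induction l with
  | nil => rfl
  | cons x t ih =>
    simp only [List.find?_cons]
    rw [h x List.mem_cons_self, ih (fun y hy => h y (List.mem_cons_of_mem _ hy))]

theorem pvZipTail_fst : ∀ (l : List Int), (l.zip l.tail).map Prod.fst = l.dropLast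
  | [] => rfl
  | [_] => rfl
  | a :: b :: t => by
    have h := pvZipTail_fst (b :: t)
    simp only [List.tail_cons] at h ⊢
    simp [List.zip_cons_cons, h]

theorem pvMemZipTail : ∀ (l : List Int) (p : Int × Int), p ∈ l.zip l.tail →
    ∃ u w, l = u ++ p.1 :: p.2 :: w
  | a :: b :: t, p, h => by
    rcases List.mem_cons.mp (by simpa [List.zip_cons_cons] using h) with rfl | h'
    · exact ⟨[], t, rfl⟩
    · obtain ⟨u, w, hw⟩ := pvMemZipTail (b :: t) p (by simpa using h')
      exact ⟨a :: u, w, by rw [List.cons_append, ← hw]⟩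

theorem pvSuccExists : ∀ (l : List Int), l.Pairwise (· < ·) → ∀ (s e : Int), s ∈ l → e ∈ l → s < e →
    ∃ b, (s, b) ∈ l.zip l.tail := by
  intro l
  induction l with
  | nil => intro _ s e hs; simp at hs
  | cons a t ih =>
    intro hp s e hs he hlt
    have hpa := (List.pairwise_cons.mp hp).1
    have hpt := (List.pairwise_cons.mp hp).2
    rcases List.mem_cons.mp hs with hsa | hs2
    · subst hsa
      have het : e ∈ t := by
        rcases List.mem_cons.mp he with hea | he2
        · omega
        · exact he2
      obtain ⟨b, t', ht⟩ := List.exists_cons_of_ne_nil (List.ne_nil_of_mem het)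
      subst ht
      exact ⟨b, by simp [List.zip_cons_cons]⟩
    · have het : e ∈ t := by
        rcases List.mem_cons.mp he with hea | he2
        · exact absurd (hpa s hs2) (by omega)
        · exact he2
      obtain ⟨b, hb⟩ := ih hpt s e hs2 het hlt
      obtain ⟨c, t', ht⟩ := List.exists_cons_of_ne_nil (List.ne_nil_of_mem hs2)
      subst ht
      refine ⟨b, ?_⟩
      simp only [List.tail_cons, List.zip_cons_cons, List.mem_cons]
      right
      simpa using hb

theorem pvGapSucc (indices : List Int) (p : Int × Int)
    (hp : p ∈ (PySem.List.sorted (PySem.Set.ofList indices) (fun x => x) false).zip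
              (PySem.List.sorted (PySem.Set.ofList indices) (fun x => x) false).tail) :
    pvMG p.1 indices = some (p.2 - p.1) := by
  set vals := PySem.List.sorted (PySem.Set.ofList indices) (fun x => x) false with hv
  have hso : vals.Pairwise (· < ·) := by rw [hv]; exact PySem.List.sorted_ofList_pairwise_lt indices
  have hmem : ∀ x : Int, x ∈ vals ↔ x ∈ indices := by
    intro x; rw [hv]; simp [PySem.List.mem_sorted, PySem.Set.mem_ofList]
  obtain ⟨u, w, hw⟩ := pvMemZipTail vals p hp
  rw [hw] at hso
  obtain ⟨hu, hrest, hcross⟩ := List.pairwise_append.mp hso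
  have h12 : p.1 < p.2 := (List.pairwise_cons.mp hrest).1 p.2 (by simp)
  have h1w : ∀ x ∈ w, p.2 < x :=
    (List.pairwise_cons.mp (List.pairwise_cons.mp hrest).2).1
  apply pvMG_eq_of
  · have he : p.1 + (p.2 - p.1) = p.2 := by ring
    rw [he, ← hmem, hw]; simp
  · omega
  · intro e he hlt
    have hev : e ∈ vals := (hmem e).mpr he
    rw [hw] at hev
    simp only [List.mem_append, List.mem_cons] at hev
    rcases hev with hev | hev | hev | hev
    · have := hcross e hev p.1 (by simp); omega
    · omega
    · omega
    · have := h1w e hev; omega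

theorem pvSuccOf (indices : List Int) (s m : Int) (hs : s ∈ indices)
    (h : pvMG s indices = some m) :
    (s, s + m) ∈ (PySem.List.sorted (PySem.Set.ofList indices) (fun x => x) false).zip
                 (PySem.List.sorted (PySem.Set.ofList indices) (fun x => x) false).tail := by
  set vals := PySem.List.sorted (PySem.Set.ofList indices) (fun x => x) false with hv
  have hso : vals.Pairwise (· < ·) := by rw [hv]; exact PySem.List.sorted_ofList_pairwise_lt indices
  have hmem : ∀ x : Int, x ∈ vals ↔ x ∈ indices := by
    intro x; rw [hv]; simp [PySem.List.mem_sorted, PySem.Set.mem_ofList]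
  obtain ⟨h1, h2, _h3⟩ := pvMG_some s indices m h
  obtain ⟨b, hb⟩ := pvSuccExists vals hso s (s + m) ((hmem s).mpr hs) ((hmem _).mpr h1) (by omega)
  have hgs := pvGapSucc indices (s, b) hb
  rw [h] at hgs
  have hbm : b = s + m := by have := Option.some.inj hgs; omega
  rw [← hbm]
  exact hb

-- ===== VERDICT (by name: the statement is the Claim_ definition above) =====
theorem short_extract_substring_spec : Claim_equal_short_extract_substring := by
  intro my_str indices _hDom hPre
  unfold Spec_short_extract_substring short_extract_substring short_extract_substring_alt
  simp only []
  have hAfun : (fun (st : Int × Option Int) start_index =>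
      let cur := indices.foldl (fun (c : Option Int) end_index =>
        if 0 < end_index - start_index then
          match c with
          | none => some (end_index - start_index)
          | some g => if end_index - start_index < g then some (end_index - start_index) else c
        else c) none
      match cur with
      | none => st
      | some c =>
        match st.2 with
        | none => (start_index, some c)
        | some g => if c < g then (start_index, some c) else st)
      = (fun (st : Int × Option Int) s =>
        match pvMG s indices with
        | none => st
        | some c =>
          match st.2 with
          | none => (s, some c)
          | some g => if c < g then (s, some c) else st) := by
    funext st s
    simp only [pvMG_foldl]
    rfl
  rw [hAfun, pvPick_foldl (fun s => pvMG s indices) indices (-1) none]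
  have hpe : ∃ m, (pvPick (fun s => pvMG s indices) indices).2 = some m := by
    cases hp2 : (pvPick (fun s => pvMG s indices) indices).2 with
    | some m => exact ⟨m, rfl⟩
    | none =>
      exfalso
      obtain ⟨a, ha, b, hb, hab⟩ := hPre
      have hnone := pvPick_none _ indices hp2 a ha
      exact absurd hab ((pvMG_none_iff a indices).mp hnone b hb)
  obtain ⟨m, hp2⟩ := hpe
  obtain ⟨hbmem, hbmg, hmin⟩ := pvPick_min _ indices m hp2
  rw [hp2]
  simp only []
  rw [hp2]
  simp only []
  -- B side
  set vals := PySem.List.sorted (PySem.Set.ofList indices) (fun x => x) false with hv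
  set gapsD := (vals.zip vals.tail).foldl
    (fun (d : PySem.Dict Int Int) p => d.insert p.1 (p.2 - p.1)) PySem.Dict.empty with hg
  have hso : vals.Pairwise (· < ·) := by rw [hv]; exact PySem.List.sorted_ofList_pairwise_lt indices
  have hmem : ∀ x : Int, x ∈ vals ↔ x ∈ indices := by
    intro x; rw [hv]; simp [PySem.List.mem_sorted, PySem.Set.mem_ofList]
  have hvnd : vals.Nodup := hso.imp (fun h => ne_of_lt h)
  have hfstnd : ((vals.zip vals.tail).map Prod.fst).Nodup := by
    rw [pvZipTail_fst]; exact List.Nodup.sublist (List.dropLast_sublist _) hvnd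
  have hitems : gapsD.items = (vals.zip vals.tail).map (fun p => (p.1, p.2 - p.1)) := by
    rw [hg]
    have h1 := PySem.Dict.items_foldl_insert_fresh (l := vals.zip vals.tail)
      (k := fun p : Int × Int => p.1) (v := fun p : Int × Int => p.2 - p.1)
      (d := PySem.Dict.empty) (by simp [PySem.Dict.contains_empty]) (by simpa using hfstnd)
    simpa using h1
  have hkeysnd : gapsD.keys.Nodup := by
    simp only [PySem.Dict.keys, hitems, List.map_map]
    simpa [Function.comp] using hfstnd
  have hvalues : gapsD.values = (vals.zip vals.tail).map (fun p => p.2 - p.1) := by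
    simp only [PySem.Dict.values, hitems, List.map_map]
    simp [Function.comp]
  have hget : ∀ i, i ∈ indices → gapsD.get? i = pvMG i indices := by
    intro i hi
    cases hmg : pvMG i indices with
    | some c =>
      have hz := pvSuccOf indices i c hi hmg
      rw [← hv] at hz
      have hitem : (i, c) ∈ gapsD.items := by
        rw [hitems]
        exact List.mem_map.mpr ⟨(i, i + c), hz, by simp [show i + c - i = c from by ring]⟩
      exact PySem.Dict.get?_of_mem_items gapsD hitem hkeysnd
    | none =>
      cases hgq : gapsD.get? i with
      | none => rfl
      | some v =>
        exfalso
        have hitem := PySem.Dict.mem_items_of_get?_eq_some gapsD hgq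
        rw [hitems] at hitem
        obtain ⟨p, hpz, hpe⟩ := List.mem_map.mp hitem
        have h1 : p.1 = i := congrArg Prod.fst hpe
        have h2 := pvGapSucc indices p (by rw [hv] at hpz; exact hpz)
        rw [h1, hmg] at h2
        cases h2
  have hmz := pvSuccOf indices ((pvPick (fun s => pvMG s indices) indices).1) m hbmem hbmg
  rw [← hv] at hmz
  have hmV : m ∈ gapsD.values := by
    rw [hvalues]
    exact List.mem_map.mpr ⟨_, hmz, by ring⟩
  have hminv : PySem.List.min? gapsD.values (fun x => x) = some m := by
    cases hm' : PySem.List.min? gapsD.values (fun x => x) with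
    | none =>
      rw [PySem.List.min?_eq_none_iff] at hm'
      rw [hm'] at hmV
      cases hmV
    | some m' =>
      have hm'le : m' ≤ m := PySem.List.min?_isMin hm' m hmV
      have hm'mem : m' ∈ gapsD.values := PySem.List.min?_mem hm'
      rw [hvalues] at hm'mem
      obtain ⟨p, hpz, hpe⟩ := List.mem_map.mp hm'mem
      have hp1 : pvMG p.1 indices = some (p.2 - p.1) :=
        pvGapSucc indices p (by rw [hv] at hpz; exact hpz)
      have hp1i : p.1 ∈ indices := by
        refine (hmem p.1).mp ?_
        obtain ⟨u, w, hw⟩ := pvMemZipTail vals p hpz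
        rw [hw]; simp
      have hmm : m ≤ p.2 - p.1 := hmin p.1 hp1i (p.2 - p.1) hp1
      congr 1
      omega
  have hfind : indices.find? (fun i => gapsD.get? i == some m) = some
      ((pvPick (fun s => pvMG s indices) indices).1) := by
    rw [pvFind_congr_mem indices _ (fun i => pvMG i indices == some m)
      (fun x hx => by rw [hget x hx])]
    exact pvPick_find _ indices m hp2
  rw [hminv]
  simp only []
  rw [hfind]
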